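-- pv_equiv track=rewrite | github.com/MrBrantCode/unitest_baseline | mut_generate/mist_train_cf/cf_59734/solution.py | consecutiveLetters
-- ===== SOURCE A (Python) =====
-- def consecutiveLetters(strings):
--     """
--     This function takes a list of strings as input, removes all special characters,
--     digits, and trailing spaces from each string, and returns the modified list
--     sorted in descending order based on the highest possible number of consecutive
--     letters in each string.
--
--     Args:
--         strings (list): A list of strings.
--
--     Returns:
--         list: The modified list sorted in descending order based on the highest
--         possible number of consecutive letters in each string.
--     """
--
--     def is_alpha(char):
--         """Checks if a character is a letter."""
--         return ('A' <= char <= 'Z') or ('a' <= char <= 'z')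
--
--     def remove_special_chars(s):
--         """Removes all special characters, digits, and trailing spaces from a string."""
--         result = ''
--         for char in s:
--             if is_alpha(char) or char == ' ':
--                 result += char
--         return result.strip()
--
--     def count_consecutive_letters(s):
--         """Counts the highest possible number of consecutive letters in a string."""
--         max_count = 0
--         current_count = 0
--         for char in s:
--             if is_alpha(char):
--                 current_count += 1
--                 max_count = max(max_count, current_count)
--             else:
--                 current_count = 0
--         return max_count
--
--     # Remove special characters from each string
--     cleaned_strings = [remove_special_chars(s) for s in strings]
--
--     # Sort the strings based on the highest possible number of consecutive letters
--     sorted_strings = sorted(cleaned_strings, key=count_consecutive_letters, reverse=True)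
--
--     return sorted_strings
-- ===== SOURCE B (Python) =====
-- def consecutiveLetters(strings):
--     def clean(s):
--         return ''.join(c for c in s if 'A' <= c <= 'Z' or 'a' <= c <= 'z' or c == ' ').strip()
--
--     def key(t):
--         return max((len(w) for w in t.split()), default=0)
--
--     return sorted((clean(s) for s in strings), key=key, reverse=True)
-- ===== Notes on version B (the rewrite author's own statement) =====
-- stated objective: simpler
-- what changed: Cleaning becomes a single filter+join instead of an accumulator loop, and the sort key becomes the longest whitespace-separated token length (split + max) instead of a running max/current-counter scan; correctness rests on the fact that in a cleaned string only spaces break letter runs.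
import Mathlib
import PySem

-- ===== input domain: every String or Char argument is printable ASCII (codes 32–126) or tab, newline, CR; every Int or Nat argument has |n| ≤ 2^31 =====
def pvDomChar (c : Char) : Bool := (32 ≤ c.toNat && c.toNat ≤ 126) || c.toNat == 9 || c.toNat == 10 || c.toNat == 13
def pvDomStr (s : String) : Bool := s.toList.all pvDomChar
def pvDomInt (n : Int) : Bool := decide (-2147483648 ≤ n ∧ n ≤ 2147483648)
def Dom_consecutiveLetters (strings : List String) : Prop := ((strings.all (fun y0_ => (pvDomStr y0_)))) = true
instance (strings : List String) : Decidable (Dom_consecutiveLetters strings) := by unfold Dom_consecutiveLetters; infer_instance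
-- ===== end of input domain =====

-- B replaces A's running-counter scan with clean-by-filter + "longest whitespace token" as the sort key (objective: simpler decomposition, same cost).

-- ===== PORT A =====
def pvIsAlpha (c : Char) : Bool := (decide ('A' ≤ c) && decide (c ≤ 'Z')) || (decide ('a' ≤ c) && decide (c ≤ 'z'))

def pvRemoveSpecialChars (s : String) : String :=
  PySem.Str.strip (String.ofList
    (s.toList.foldl (fun acc c => if pvIsAlpha c || c == ' ' then acc ++ [c] else acc) []))

def pvCountConsecutive (s : String) : Int :=
  (s.toList.foldl (fun (st : Int × Int) c =>
      if pvIsAlpha c then (max st.1 (st.2 + 1), st.2 + 1) else (st.1, 0)) (0, 0)).1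

def consecutiveLetters (strings : List String) : List String :=
  PySem.List.sorted (strings.map pvRemoveSpecialChars) pvCountConsecutive true

-- ===== PORT B =====
def pvKeep (c : Char) : Bool := (decide ('A' ≤ c) && decide (c ≤ 'Z')) || (decide ('a' ≤ c) && decide (c ≤ 'z')) || c == ' '

def pvClean (s : String) : String :=
  PySem.Str.strip (String.ofList (s.toList.filter pvKeep))

def pvMaxTokenLen (t : String) : Int :=
  match (PySem.Str.split₀ t).map PySem.Str.len with
  | [] => 0
  | x :: xs => xs.foldl max x

def consecutiveLetters_alt (strings : List String) : List String :=
  PySem.List.sorted (strings.map pvClean) pvMaxTokenLen true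

-- ===== PRECONDITION & SPEC =====
def Spec_consecutiveLetters (strings : List String) (out : List String) : Prop := out = consecutiveLetters_alt strings
instance (strings : List String) (out : List String) : Decidable (Spec_consecutiveLetters strings out) := by unfold Spec_consecutiveLetters; infer_instance

-- ===== CLAIM (what is proved, stated in full; the proofs are below) =====
def Claim_equal_consecutiveLetters : Prop := ∀ (strings : List String), Dom_consecutiveLetters strings → Spec_consecutiveLetters strings (consecutiveLetters strings)

-- ===== LEMMAS AND PROOFS =====

-- the two cleaners agree
lemma clean_eq (s : String) : pvRemoveSpecialChars s = pvClean s := by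
  unfold pvRemoveSpecialChars pvClean
  rw [show (fun (acc : List Char) (c : Char) => if pvIsAlpha c || c == ' ' then acc ++ [c] else acc)
        = (fun acc c => if pvKeep c then acc ++ [id c] else acc) by
      funext acc c; simp [pvKeep, pvIsAlpha, Bool.or_assoc]]
  rw [PySem.List.foldl_append_if]
  simp

-- A's scan step and the fold of max over token lengths
def pvStep (st : Int × Int) (c : Char) : Int × Int :=
  if pvIsAlpha c then (max st.1 (st.2 + 1), st.2 + 1) else (st.1, 0)

def pvG (ts : List (List Char)) (a : Int) : Int :=
  ts.foldl (fun a t => max a (t.length : Int)) a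

def pvGo0 (l cur : List Char) : List (List Char) := PySem.Chars.split₀.go l cur []

lemma go_acc (l : List Char) : ∀ (cur : List Char) (acc : List (List Char)),
    PySem.Chars.split₀.go l cur acc = acc.reverse ++ pvGo0 l cur := by
  induction l with
  | nil => intro cur acc; unfold pvGo0 PySem.Chars.split₀.go; by_cases h : cur.isEmpty <;> simp [h]
  | cons c l ih =>
      intro cur acc
      unfold pvGo0
      rw [PySem.Chars.split₀.go.eq_def]
      conv_rhs => rw [PySem.Chars.split₀.go.eq_def]
      by_cases hs : PySem.Chars.isspace c
      · by_cases hc : cur.isEmpty <;> simp [hs, hc, ih]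
      · simp [hs, ih]

lemma pvGo0_nil (cur : List Char) :
    pvGo0 [] cur = if cur.isEmpty then [] else [cur.reverse] := by
  unfold pvGo0 PySem.Chars.split₀.go; by_cases h : cur.isEmpty <;> simp [h]

lemma pvGo0_cons_letter {c : Char} (l cur : List Char) (hs : PySem.Chars.isspace c = false) :
    pvGo0 (c :: l) cur = pvGo0 l (c :: cur) := by
  conv_lhs => unfold pvGo0; rw [PySem.Chars.split₀.go.eq_def]
  simp [hs, pvGo0]

lemma pvGo0_cons_space {c : Char} (l cur : List Char) (hs : PySem.Chars.isspace c = true) :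
    pvGo0 (c :: l) cur = (if cur.isEmpty then [] else [cur.reverse]) ++ pvGo0 l [] := by
  conv_lhs => unfold pvGo0; rw [PySem.Chars.split₀.go.eq_def]
  by_cases hc : cur.isEmpty
  · simp [hs, hc, pvGo0]
  · simp [hs, hc, go_acc]

lemma pvG_ge (ts : List (List Char)) : ∀ a : Int, a ≤ pvG ts a := by
  induction ts with
  | nil => intro a; simp [pvG]
  | cons t ts ih =>
      intro a
      have h1 : a ≤ max a (t.length : Int) := le_max_left _ _
      have h2 := ih (max a (t.length : Int))
      simpa [pvG] using le_trans h1 h2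

lemma pvG_shift (ts : List (List Char)) : ∀ a : Int, 0 ≤ a → pvG ts a = max a (pvG ts 0) := by
  induction ts with
  | nil => intro a ha; simp [pvG]; omega
  | cons t ts ih =>
      intro a ha
      have hL : (0:Int) ≤ (t.length : Int) := by positivity
      have h1 : pvG ts (max a (t.length : Int)) = max (max a (t.length : Int)) (pvG ts 0) := ih _ (by omega)
      have h2 : pvG ts (max 0 (t.length : Int)) = max (max 0 (t.length : Int)) (pvG ts 0) := ih _ (by omega)
      simp only [pvG, List.foldl_cons] at *
      omega

lemma pvG_append (ts us : List (List Char)) (a : Int) :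
    pvG (ts ++ us) a = pvG us (pvG ts a) := by
  simp [pvG]

lemma pvG_cur_le (l : List Char) : ∀ cur : List Char, (cur.length : Int) ≤ pvG (pvGo0 l cur) 0 := by
  induction l with
  | nil =>
      intro cur
      rw [pvGo0_nil]
      by_cases h : cur.isEmpty
      · simp_all [pvG, List.isEmpty_iff]
      · simp [h, pvG]
  | cons c l ih =>
      intro cur
      by_cases hs : PySem.Chars.isspace c
      · rw [pvGo0_cons_space l cur hs, pvG_append]
        by_cases hc : cur.isEmpty
        · rw [List.isEmpty_iff.mp hc]
          simpa [pvG] using pvG_ge (pvGo0 l []) 0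
        · simp only [hc, if_false, Bool.false_eq_true]
          have hG1 : pvG [cur.reverse] 0 = max 0 (cur.length : Int) := by simp [pvG]
          rw [hG1]
          exact le_trans (le_max_right _ _) (pvG_ge _ _)
      · rw [pvGo0_cons_letter l cur (by simpa using hs)]
        have h1 := ih (c :: cur)
        simp only [List.length_cons] at h1
        push_cast at h1
        omega

lemma pvKeep_cases (c : Char) (h : pvKeep c = true) :
    (pvIsAlpha c = true ∧ PySem.Chars.isspace c = false) ∨ (c = ' ') := by
  by_cases hc : c = ' '
  · right; exact hc
  · left
    have ha : pvIsAlpha c = true := by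
      simp [pvKeep, pvIsAlpha] at h ⊢
      rcases h with h | h
      · tauto
      · exact absurd (Char.ext (by exact_mod_cast congrArg Char.val h)) hc
    refine ⟨ha, ?_⟩
    simp only [pvIsAlpha, Bool.or_eq_true, Bool.and_eq_true, decide_eq_true_eq, Char.le_def,
      UInt32.le_iff_toNat_le] at ha
    have e1 : 'A'.val.toNat = 65 := by decide
    have e2 : 'Z'.val.toNat = 90 := by decide
    have e3 : 'a'.val.toNat = 97 := by decide
    have e4 : 'z'.val.toNat = 122 := by decide
    rw [e1, e2, e3, e4] at ha
    simp only [PySem.Chars.isspace, Char.toNat]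
    simp only [Bool.or_eq_false_iff, Bool.and_eq_false_iff, decide_eq_false_iff_not]
    omega

lemma space_isspace : PySem.Chars.isspace ' ' = true := by decide
lemma space_not_alpha : pvIsAlpha ' ' = false := by decide

lemma pv_inv (l : List Char) : ∀ (cur : List Char) (m : Int),
    (∀ c ∈ l, pvKeep c = true) → (cur.length : Int) ≤ m → 0 ≤ m →
    (l.foldl pvStep (m, (cur.length : Int))).1 = max m (pvG (pvGo0 l cur) 0) := by
  induction l with
  | nil =>
      intro cur m _ hlen hm
      rw [pvGo0_nil]
      by_cases h : cur.isEmpty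
      · simp [h, pvG]; omega
      · simp [h, pvG]; omega
  | cons c l ih =>
      intro cur m hok hlen hm
      have hc := hok c (List.mem_cons_self)
      have hrest : ∀ c ∈ l, pvKeep c = true := fun x hx => hok x (List.mem_cons_of_mem _ hx)
      rcases pvKeep_cases c hc with ⟨ha, hs⟩ | hsp
      · -- letter: run grows
        rw [pvGo0_cons_letter l cur hs]
        simp only [List.foldl_cons, pvStep, ha, if_true]
        have hlen' : ((c :: cur).length : Int) ≤ max m ((cur.length : Int) + 1) := by
          simp only [List.length_cons]; push_cast; omega
        have h1 := ih (c :: cur) (max m ((cur.length : Int) + 1)) hrest hlen' (by omega)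
        simp only [List.length_cons] at h1
        push_cast at h1
        rw [h1]
        have hX : ((cur.length : Int) + 1) ≤ pvG (pvGo0 l (c :: cur)) 0 := by
          have h2 := pvG_cur_le l (c :: cur)
          simp only [List.length_cons] at h2
          push_cast at h2; omega
        omega
      · -- space: run resets
        subst hsp
        rw [pvGo0_cons_space l cur space_isspace]
        simp only [List.foldl_cons, pvStep, space_not_alpha, if_false, Bool.false_eq_true]
        have h0 := ih [] m hrest (by simpa using hm) hm
        simp only [List.length_nil, Nat.cast_zero] at h0
        by_cases hcur : cur.isEmpty
        · simpa [hcur, pvGo0] using h0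
        · rw [pvG_append]
          simp only [hcur, if_false, Bool.false_eq_true]
          have hG1 : pvG [cur.reverse] 0 = (cur.length : Int) := by
            simp [pvG]
          rw [hG1, pvG_shift _ _ (by positivity)]
          rw [h0]
          omega

lemma mem_strip {c : Char} {l : List Char} (h : c ∈ PySem.Chars.strip l) : c ∈ l := by
  unfold PySem.Chars.strip PySem.Chars.rstrip PySem.Chars.lstrip at h
  simp only [List.mem_reverse] at h
  have h1 := (List.dropWhile_sublist (p := PySem.Chars.isspace)
      (l := (List.dropWhile PySem.Chars.isspace l).reverse)).mem h
  simp only [List.mem_reverse] at h1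
  exact (List.dropWhile_sublist (p := PySem.Chars.isspace) (l := l)).mem h1

lemma maxTok_eq (t : String) : pvMaxTokenLen t = pvG (PySem.Chars.split₀ t.toList) 0 := by
  unfold pvMaxTokenLen PySem.Str.split₀
  cases h : PySem.Chars.split₀ t.toList with
  | nil => simp [pvG]
  | cons w ws =>
      simp only [List.map_cons, List.foldl_cons, List.map_map, List.foldl_map, pvG,
        PySem.Str.len, Function.comp, String.toList_ofList]
      rw [show max (0:Int) (w.length : Int) = (w.length : Int) from max_eq_right (by positivity)]

-- on a cleaned string (letters and spaces only) the two keys coincide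
lemma keys_eq_on_clean (s : String) : pvCountConsecutive (pvClean s) = pvMaxTokenLen (pvClean s) := by
  have hok : ∀ c ∈ (pvClean s).toList, pvKeep c = true := by
    intro c hcmem
    unfold pvClean PySem.Str.strip at hcmem
    simp only [String.toList_ofList] at hcmem
    exact (List.mem_filter.mp (mem_strip hcmem)).2
  unfold pvCountConsecutive
  rw [maxTok_eq]
  have h1 := pv_inv ((pvClean s).toList) [] 0 hok (by simp) le_rfl
  simp only [List.length_nil, Nat.cast_zero] at h1
  have h2 : PySem.Chars.split₀ (pvClean s).toList = pvGo0 (pvClean s).toList [] := rfl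
  rw [h2]
  rw [show (fun (st : Int × Int) (c : Char) =>
        if pvIsAlpha c then (max st.1 (st.2 + 1), st.2 + 1) else (st.1, 0)) = pvStep from rfl]
  rw [h1]
  have h3 := pvG_ge (pvGo0 (pvClean s).toList []) 0
  omega

-- sorted ignores the key beyond its values on the list's members
lemma insertBy_mem {α : Type} (before : α → α → Bool) (x : α) (acc : List α) :
    ∀ a ∈ PySem.List.insertBy before x acc, a = x ∨ a ∈ acc := by
  induction acc with
  | nil => intro a ha; simp [PySem.List.insertBy] at ha; tauto
  | cons y ys ih =>
      intro a ha
      unfold PySem.List.insertBy at ha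
      by_cases h : before x y
      · simp [h] at ha
        rcases ha with h1 | h1 | h1 <;> simp [List.mem_cons, h1]
      · simp [h] at ha
        rcases ha with ha | ha
        · right; simp [ha]
        · rcases ih a ha with h' | h'
          · tauto
          · right; simp [h']

lemma insertBy_congr {α : Type} (b1 b2 : α → α → Bool) (x : α) (acc : List α)
    (h : ∀ y ∈ acc, b1 x y = b2 x y) :
    PySem.List.insertBy b1 x acc = PySem.List.insertBy b2 x acc := by
  induction acc with
  | nil => rfl
  | cons y ys ih =>
      unfold PySem.List.insertBy
      rw [h y (List.mem_cons_self)]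
      by_cases hb : b2 x y
      · simp [hb]
      · simp [hb]
        exact ih (fun z hz => h z (List.mem_cons_of_mem _ hz))

lemma foldl_insertBy_congr {α : Type} (b1 b2 : α → α → Bool) (P : α → Prop)
    (hb : ∀ x y, P x → P y → b1 x y = b2 x y) :
    ∀ (xs acc : List α), (∀ a ∈ xs, P a) → (∀ a ∈ acc, P a) →
    xs.foldl (fun acc x => PySem.List.insertBy b1 x acc) acc
      = xs.foldl (fun acc x => PySem.List.insertBy b2 x acc) acc := by
  intro xs
  induction xs with
  | nil => intro acc _ _; rfl
  | cons x xs ih =>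
      intro acc hxs hacc
      simp only [List.foldl_cons]
      have hx : P x := hxs x (List.mem_cons_self)
      rw [insertBy_congr b1 b2 x acc (fun y hy => hb x y hx (hacc y hy))]
      apply ih
      · exact fun a ha => hxs a (List.mem_cons_of_mem _ ha)
      · intro a ha
        rcases insertBy_mem b2 x acc a ha with h | h
        · exact h ▸ hx
        · exact hacc a h

lemma sorted_congr {α : Type} (xs : List α) (k1 k2 : α → Int) (rev : Bool)
    (h : ∀ a ∈ xs, k1 a = k2 a) :
    PySem.List.sorted xs k1 rev = PySem.List.sorted xs k2 rev := by
  unfold PySem.List.sorted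
  apply foldl_insertBy_congr _ _ (fun a => k1 a = k2 a)
  · intro x y hx hy
    cases rev <;> simp [hx, hy]
  · exact h
  · simp

-- ===== VERDICT (by name: the statement is the Claim_ definition above) =====
theorem consecutiveLetters_spec : Claim_equal_consecutiveLetters := by
  intro strings _
  unfold Spec_consecutiveLetters consecutiveLetters consecutiveLetters_alt
  rw [show strings.map pvRemoveSpecialChars = strings.map pvClean from
    List.map_congr_left (fun s _ => clean_eq s)]
  apply sorted_congr
  intro a ha
  rcases List.mem_map.mp ha with ⟨s, _, rfl⟩
  exact keys_eq_on_clean s
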